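-- pv_equiv track=rewrite | github.com/mathcarignani/pc-tesis | dataset_parser/scripts/compare_results.py | parse_mask_line
-- ===== SOURCE A (Python) =====
-- def parse_mask_line(line):
--     first_col, last_col = 7, 13
--     line = line[:first_col] + line[last_col:]
--     new_line = line[:7]
--     for idx, i in enumerate(line[7:]):
--         if (idx + 2) % 4 == 0:  # 2, 6, 10, 14, etc. => values
--             i = "{:,}".format(int(i)).replace(',', '.')  # '526417' = '526.417'
--             new_line.append(i)
--         elif (idx + 1) % 4 == 0:  # 3, 7, 11, 15, etc. => percentages
--             new_line.append(i)
--     return new_line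
-- ===== SOURCE B (Python) =====
-- def parse_mask_line(line):
--     line = line[:7] + line[13:]
--     new_line = line[:7]
--     rest = line[7:]
--     for j in range(0, len(rest), 4):
--         group = rest[j:j+4]
--         if len(group) >= 3:
--             new_line.append('{:,}'.format(int(group[2])).replace(',', '.'))
--         if len(group) >= 4:
--             new_line.append(group[3])
--     return new_line
-- ===== Notes on version B (the rewrite author's own statement) =====
-- stated objective: idiomatic
-- what changed: B replaces A's flat enumerate over the spliced tail with two modular index tests by an explicit stride-4 loop over 4-field records, slicing each group and appending its formatted value field and percentage field directly; Pre_ excludes only inputs where A raises ValueError (a value field int() cannot parse).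
import Mathlib
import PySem

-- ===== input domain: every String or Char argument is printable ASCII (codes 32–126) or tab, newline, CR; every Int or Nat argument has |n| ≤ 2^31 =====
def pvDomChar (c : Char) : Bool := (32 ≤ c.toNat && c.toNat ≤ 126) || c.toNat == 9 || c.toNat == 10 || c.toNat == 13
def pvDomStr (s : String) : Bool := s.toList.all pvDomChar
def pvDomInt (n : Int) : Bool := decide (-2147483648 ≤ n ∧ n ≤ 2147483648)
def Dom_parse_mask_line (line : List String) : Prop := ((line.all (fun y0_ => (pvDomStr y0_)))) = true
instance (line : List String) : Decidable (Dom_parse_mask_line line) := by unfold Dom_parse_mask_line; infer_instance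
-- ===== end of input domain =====

-- B re-groups the flat index-mod-4 scan of A into explicit stride-4 record chunks (alternative
-- decomposition, same cost); return values agree on Pre_ (inputs where every value field parses as int).

-- shared helper: "{:,}".format(n).replace(',', '.') — Python's thousands formatting with '.' separators
-- (group the decimal digits of str(n) in threes from the right, sign kept in front); exact for every Int.
def pvGrpRev : List Char → List Char
  | a :: b :: c :: d :: rest => a :: b :: c :: '.' :: pvGrpRev (d :: rest)
  | l => l

def pvFmtDots (n : Int) : String :=
  let ds := PySem.Int.toChars n
  match ds with
  | '-' :: digits => String.ofList ('-' :: (pvGrpRev digits.reverse).reverse)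
  | digits => String.ofList ((pvGrpRev digits.reverse).reverse)

-- int(s) under Pre_ (ofStr? is some there); total form with default 0
def pvIntOf (s : String) : Int := (PySem.Int.ofStr? s).getD 0

-- ===== PORT A =====
-- loop body of A's 'for idx, i in enumerate(line[7:])'
def pml_stepA (acc : List String) (p : Int × String) : List String :=
  if PySem.Int.mod (p.1 + 2) 4 = 0 then acc ++ [pvFmtDots (pvIntOf p.2)]
  else if PySem.Int.mod (p.1 + 1) 4 = 0 then acc ++ [p.2]
  else acc

def parse_mask_line (line : List String) : List String :=
  let line2 := PySem.List.slice line none (some 7) ++ PySem.List.slice line (some 13) none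
  let new_line := PySem.List.slice line2 none (some 7)
  (PySem.List.enumerate (PySem.List.slice line2 (some 7) none) 0).foldl pml_stepA new_line

-- ===== PORT B =====
-- B's stride-4 loop: each group of 4 contributes its formatted value field (offset 2, if present)
-- and its percentage field (offset 3, if present)
def pml_groups : List String → List String
  | _ :: _ :: g2 :: g3 :: rest => pvFmtDots (pvIntOf g2) :: g3 :: pml_groups rest
  | [_, _, g2] => [pvFmtDots (pvIntOf g2)]
  | _ => []

def parse_mask_line_alt (line : List String) : List String :=
  let line2 := PySem.List.slice line none (some 7) ++ PySem.List.slice line (some 13) none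
  PySem.List.slice line2 none (some 7) ++ pml_groups (PySem.List.slice line2 (some 7) none)

-- ===== PRECONDITION & SPEC =====
-- Pre_ excludes exactly the inputs where A raises ValueError: a value field (index ≡ 2 mod 4 of the
-- spliced tail) that int() cannot parse.
def Pre_parse_mask_line (line : List String) : Prop :=
  ∀ i : Nat, i < ((PySem.List.slice line none (some 7) ++ PySem.List.slice line (some 13) none).drop 7).length →
    i % 4 = 2 →
    (PySem.Int.ofStr? (((PySem.List.slice line none (some 7) ++ PySem.List.slice line (some 13) none).drop 7).getD i "")).isSome
instance (line : List String) : Decidable (Pre_parse_mask_line line) := by unfold Pre_parse_mask_line; infer_instance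

def pvWitness_parse_mask_line : List String :=
  ["h0","h1","h2","h3","h4","h5","h6","x","x","x","x","x","x","a","b","1234567","50%","c","d","-89"]

def Spec_parse_mask_line (line : List String) (out : List String) : Prop := out = parse_mask_line_alt line
instance (line : List String) (out : List String) : Decidable (Spec_parse_mask_line line out) := by unfold Spec_parse_mask_line; infer_instance

-- ===== CLAIM (what is proved, stated in full; the proofs are below) =====
def Claim_equal_parse_mask_line : Prop := ∀ (line : List String), Dom_parse_mask_line line → Pre_parse_mask_line line → Spec_parse_mask_line line (parse_mask_line line)

-- ===== LEMMAS AND PROOFS =====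

-- A's enumerate-fold from any index s ≡ 0 (mod 4) appends exactly B's chunk output
lemma pml_loop_eq (rest : List String) (s : Int) (acc : List String) (hs : s % 4 = 0) :
    (PySem.List.enumerate rest s).foldl pml_stepA acc = acc ++ pml_groups rest := by
  have hmod : ∀ a : Int, PySem.Int.mod a 4 = a % 4 :=
    fun a => PySem.Int.mod_eq_emod_of_pos (by norm_num)
  induction rest using pml_groups.induct generalizing s acc with
  | case1 g0 g1 g2 g3 rest ih =>
      simp only [PySem.List.enumerate_cons, List.foldl_cons, pml_stepA, hmod]
      rw [if_neg (by omega : ¬ ((s + 2) % 4 = 0)), if_neg (by omega : ¬ ((s + 1) % 4 = 0)),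
          if_neg (by omega : ¬ ((s + 1 + 2) % 4 = 0)), if_neg (by omega : ¬ ((s + 1 + 1) % 4 = 0)),
          if_pos (by omega : (s + 1 + 1 + 2) % 4 = 0),
          if_neg (by omega : ¬ ((s + 1 + 1 + 1 + 2) % 4 = 0)),
          if_pos (by omega : (s + 1 + 1 + 1 + 1) % 4 = 0),
          ih (s + 1 + 1 + 1 + 1) _ (by omega)]
      simp [pml_groups]
  | case2 g0 g1 g2 =>
      simp only [PySem.List.enumerate_cons, PySem.List.enumerate_nil, List.foldl_cons,
        List.foldl_nil, pml_stepA, hmod]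
      rw [if_neg (by omega : ¬ ((s + 2) % 4 = 0)), if_neg (by omega : ¬ ((s + 1) % 4 = 0)),
          if_neg (by omega : ¬ ((s + 1 + 2) % 4 = 0)), if_neg (by omega : ¬ ((s + 1 + 1) % 4 = 0)),
          if_pos (by omega : (s + 1 + 1 + 2) % 4 = 0)]
      simp [pml_groups]
  | case3 l h1 h2 =>
      match l with
      | [] => simp [PySem.List.enumerate_nil, pml_groups]
      | [g0] =>
          simp only [PySem.List.enumerate_cons, PySem.List.enumerate_nil, List.foldl_cons,
            List.foldl_nil, pml_stepA, hmod]
          rw [if_neg (by omega : ¬ ((s + 2) % 4 = 0)), if_neg (by omega : ¬ ((s + 1) % 4 = 0))]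
          simp [pml_groups]
      | [g0, g1] =>
          simp only [PySem.List.enumerate_cons, PySem.List.enumerate_nil, List.foldl_cons,
            List.foldl_nil, pml_stepA, hmod]
          rw [if_neg (by omega : ¬ ((s + 2) % 4 = 0)), if_neg (by omega : ¬ ((s + 1) % 4 = 0)),
              if_neg (by omega : ¬ ((s + 1 + 2) % 4 = 0)), if_neg (by omega : ¬ ((s + 1 + 1) % 4 = 0))]
          simp [pml_groups]
      | [g0, g1, g2] => exact absurd rfl (h2 g0 g1 g2)
      | g0 :: g1 :: g2 :: g3 :: rest => exact absurd rfl (h1 g0 g1 g2 g3 rest)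

-- ===== VERDICT (by name: the statement is the Claim_ definition above) =====
theorem parse_mask_line_spec : Claim_equal_parse_mask_line := by
  intro line _ _
  unfold Spec_parse_mask_line parse_mask_line parse_mask_line_alt
  exact pml_loop_eq _ 0 _ (by decide)
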